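-- pv_equiv track=rewrite | github.com/moonnuitstudio/python-ai-test-tech-skills | jobskillsextractor.py | split_text_by_dot_and_newline
-- ===== SOURCE A (Python) =====
-- def split_text_by_dot_and_newline(text):
--     # List of lines
--     parts = []
--
--     # Get very line
--     for segment in text.split('\n'):
--         segment = segment.strip() #Get current element string
--
--         # Check if theres not element
--         if not segment:
--             continue
--
--         sub_segments = segment.split('.') # We separate the string but this time by dot
--
--         # CHeck every sub string
--         for sub in sub_segments:
--             sub = sub.strip()
--
--             if sub:
--                 # Remove the first two character if start with
--                 if sub.startswith(". "):
--                     sub = sub[2:]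
--
--                 parts.append(sub) # Save the sub string
--
--     return parts
-- ===== SOURCE B (Python) =====
-- def split_text_by_dot_and_newline(text):
--     parts = []
--     buf = []
--     for ch in text:
--         if ch in '.\n':
--             token = ''.join(buf).strip()
--             if token:
--                 parts.append(token)
--             buf = []
--         else:
--             buf.append(ch)
--     token = ''.join(buf).strip()
--     if token:
--         parts.append(token)
--     return parts
-- ===== Notes on version B (the rewrite author's own statement) =====
-- stated objective: simpler
-- what changed: Replaced the nested split('\n')/split('.') loops (with a dead startswith('. ') branch) by one flat character scan that accumulates a buffer and flushes a stripped non-empty token at each '.' or '\n'.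
import Mathlib
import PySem

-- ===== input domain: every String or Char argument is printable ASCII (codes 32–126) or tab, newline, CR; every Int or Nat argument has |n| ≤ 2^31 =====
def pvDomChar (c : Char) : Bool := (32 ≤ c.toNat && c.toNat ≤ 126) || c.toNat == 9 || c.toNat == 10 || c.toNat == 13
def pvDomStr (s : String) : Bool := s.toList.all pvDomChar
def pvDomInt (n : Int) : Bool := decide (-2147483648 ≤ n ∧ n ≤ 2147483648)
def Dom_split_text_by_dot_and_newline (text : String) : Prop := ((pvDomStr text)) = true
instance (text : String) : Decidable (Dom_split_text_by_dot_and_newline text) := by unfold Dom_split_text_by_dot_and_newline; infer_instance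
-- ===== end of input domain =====

-- B replaces A's nested split('\n')/split('.') loops (and their dead startswith branch) by one
-- flat character scan with a buffer; objective: simpler.

-- ===== PORT A =====
-- literal transliteration of A: split on '\n', strip, skip empties, split on '.', strip,
-- keep non-empty (including the dead startswith(". ") branch)
def split_text_by_dot_and_newline (text : String) : List String :=
  (PySem.Chars.splitOn text.toList ['\n']).foldl (fun parts segment0 =>
    let segment := PySem.Chars.strip segment0
    if segment = [] then parts
    else
      (PySem.Chars.splitOn segment ['.']).foldl (fun parts sub0 =>
        let sub := PySem.Chars.strip sub0
        if sub = [] then parts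
        else
          let sub := if PySem.Chars.startswith sub ['.', ' '] then PySem.List.slice sub (some 2) none else sub
          parts ++ [String.ofList sub]) parts) []

-- ===== PORT B =====
-- flush the buffer as a stripped token (kept only if non-empty)
def altFlush (buf : List Char) (parts : List String) : List String :=
  let t := PySem.Chars.strip buf
  if t = [] then parts else parts ++ [String.ofList t]

-- single pass over the characters: flush at '.' or '\n', otherwise grow the buffer
def altGo : List Char → List Char → List String → List String
  | [], buf, parts => altFlush buf parts
  | c :: rest, buf, parts =>
    if c == '.' || c == '\n' then altGo rest [] (altFlush buf parts)
    else altGo rest (buf ++ [c]) parts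

def split_text_by_dot_and_newline_alt (text : String) : List String :=
  altGo text.toList [] []

-- ===== PRECONDITION & SPEC =====
def Spec_split_text_by_dot_and_newline (text : String) (out : List String) : Prop := out = split_text_by_dot_and_newline_alt text
instance (text : String) (out : List String) : Decidable (Spec_split_text_by_dot_and_newline text out) := by unfold Spec_split_text_by_dot_and_newline; infer_instance

-- ===== CLAIM (what is proved, stated in full; the proofs are below) =====
def Claim_equal_split_text_by_dot_and_newline : Prop := ∀ (text : String), Dom_split_text_by_dot_and_newline text → Spec_split_text_by_dot_and_newline text (split_text_by_dot_and_newline text)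

-- ===== LEMMAS AND PROOFS =====

-- splitting a char list at every char satisfying p (Python split with a single-char sep)
def splitP (p : Char → Bool) : List Char → List (List Char)
  | [] => [[]]
  | c :: rest => if p c then [] :: splitP p rest else (splitP p rest).modifyHead (c :: ·)

-- modify the last element of a list of chunks
def mLast (f : List Char → List Char) : List (List Char) → List (List Char)
  | [] => []
  | [x] => [f x]
  | x :: y :: xs => x :: mLast f (y :: xs)

-- the token (if any) a chunk contributes
def cleanTok (x : List Char) : List String :=
  if PySem.Chars.strip x = [] then [] else [String.ofList (PySem.Chars.strip x)]

def clean (xs : List (List Char)) : List String := xs.flatMap cleanTok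

def pDot (c : Char) : Bool := c == '.'
def pNl (c : Char) : Bool := c == '\n'
def pBoth (c : Char) : Bool := c == '.' || c == '\n'

theorem splitP_ne_nil (p : Char → Bool) (l : List Char) : splitP p l ≠ [] := by
  induction l with
  | nil => simp [splitP]
  | cons c rest ih =>
    simp only [splitP]
    split
    · simp
    · cases h : splitP p rest with
      | nil => exact absurd h ih
      | cons a t => simp

theorem splitP_free (p : Char → Bool) (l : List Char) (h : ∀ c ∈ l, p c = false) :
    splitP p l = [l] := by
  induction l with
  | nil => rfl
  | cons c rest ih =>
    simp only [splitP]
    rw [if_neg (by simp [h c (by simp)]), ih (fun d hd => h d (by simp [hd]))]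
    rfl

theorem splitP_append_free_left (p : Char → Bool) (u v : List Char) (h : ∀ c ∈ u, p c = false) :
    splitP p (u ++ v) = (splitP p v).modifyHead (u ++ ·) := by
  induction u with
  | nil =>
    simp
    cases hv : splitP p v with
    | nil => exact absurd hv (splitP_ne_nil p v)
    | cons a t => simp
  | cons c rest ih =>
    simp only [List.cons_append, splitP]
    rw [if_neg (by simp [h c (by simp)]), ih (fun d hd => h d (by simp [hd]))]
    cases hv : splitP p v with
    | nil => exact absurd hv (splitP_ne_nil p v)
    | cons a t => simp

theorem splitP_append_free_right (p : Char → Bool) (u v : List Char) (h : ∀ c ∈ v, p c = false) :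
    splitP p (u ++ v) = mLast (· ++ v) (splitP p u) := by
  induction u with
  | nil => simp [splitP, splitP_free p v h, mLast]
  | cons c rest ih =>
    simp only [List.cons_append, splitP, ih]
    split
    · cases hr : splitP p rest with
      | nil => exact absurd hr (splitP_ne_nil p rest)
      | cons a t => cases t <;> simp [mLast]
    · cases hr : splitP p rest with
      | nil => exact absurd hr (splitP_ne_nil p rest)
      | cons a t =>
        cases t with
        | nil => simp [mLast]
        | cons b t' => simp [mLast]

theorem mem_splitP_free (p : Char → Bool) (l : List Char) : ∀ x ∈ splitP p l,
    ∀ c ∈ x, p c = false := by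
  induction l with
  | nil => intro x hx; simp [splitP] at hx; simp [hx]
  | cons c rest ih =>
    intro x hx
    simp only [splitP] at hx
    split at hx
    · rcases (List.mem_cons.mp hx) with h | h
      · simp [h]
      · exact ih x h
    · rename_i hc
      cases hr : splitP p rest with
      | nil => exact absurd hr (splitP_ne_nil p rest)
      | cons a t =>
        rw [hr] at hx; simp at hx
        rcases hx with h | h
        · subst h
          intro d hd
          rcases List.mem_cons.mp hd with h | h
          · subst h; simpa using hc
          · exact ih a (by rw [hr]; simp) d h
        · exact ih x (by rw [hr]; simp [h])

theorem mem_strip (c : Char) (x : List Char) (h : c ∈ PySem.Chars.strip x) : c ∈ x := by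
  simp only [PySem.Chars.strip, PySem.Chars.rstrip, PySem.Chars.lstrip] at h
  rw [List.mem_reverse] at h
  have h2 := (List.dropWhile_sublist _).mem h
  rw [List.mem_reverse] at h2
  exact (List.dropWhile_sublist _).mem h2

theorem dropWhile_all (p : Char → Bool) (u : List Char) (h : ∀ c ∈ u, p c = true) :
    List.dropWhile p u = [] := List.dropWhile_eq_nil_iff.mpr h

theorem strip_ws_append_left (u x : List Char) (h : ∀ c ∈ u, PySem.Chars.isspace c = true) :
    PySem.Chars.strip (u ++ x) = PySem.Chars.strip x := by
  simp only [PySem.Chars.strip, PySem.Chars.lstrip]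
  rw [List.dropWhile_append, dropWhile_all _ u h]
  simp

theorem rstrip_append_ws (x w : List Char) (h : ∀ c ∈ w, PySem.Chars.isspace c = true) :
    PySem.Chars.rstrip (x ++ w) = PySem.Chars.rstrip x := by
  simp only [PySem.Chars.rstrip, List.reverse_append]
  rw [List.dropWhile_append, dropWhile_all _ _ (fun c hc => h c (List.mem_reverse.mp hc))]
  simp

theorem strip_append_ws_right (x w : List Char) (h : ∀ c ∈ w, PySem.Chars.isspace c = true) :
    PySem.Chars.strip (x ++ w) = PySem.Chars.strip x := by
  simp only [PySem.Chars.strip, PySem.Chars.lstrip]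
  rw [List.dropWhile_append]
  by_cases hx : List.dropWhile PySem.Chars.isspace x = []
  · rw [hx, dropWhile_all _ w h]
    simp
  · have : (List.dropWhile PySem.Chars.isspace x).isEmpty = false := by
      simpa using hx
    rw [this]
    simp only [Bool.false_eq_true, if_false]
    exact rstrip_append_ws _ w h

theorem mem_takeWhile_pred (p : Char → Bool) (l : List Char) (c : Char)
    (h : c ∈ l.takeWhile p) : p c = true := by
  induction l with
  | nil => simp [List.takeWhile] at h
  | cons a t ih =>
    rw [List.takeWhile_cons] at h
    by_cases hp : p a
    · rw [if_pos hp] at h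
      rcases List.mem_cons.mp h with h | h
      · subst h; exact hp
      · exact ih h
    · rw [if_neg hp] at h; simp at h

theorem strip_decomp (l : List Char) :
    ∃ u w, (∀ c ∈ u, PySem.Chars.isspace c = true) ∧ (∀ c ∈ w, PySem.Chars.isspace c = true) ∧
      l = u ++ PySem.Chars.strip l ++ w := by
  refine ⟨l.takeWhile PySem.Chars.isspace,
    ((l.dropWhile PySem.Chars.isspace).reverse.takeWhile PySem.Chars.isspace).reverse,
    fun c hc => mem_takeWhile_pred _ _ _ hc, ?_, ?_⟩
  · intro c hc
    rw [List.mem_reverse] at hc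
    exact mem_takeWhile_pred _ _ _ hc
  · conv_lhs => rw [← List.takeWhile_append_dropWhile (p := PySem.Chars.isspace) (l := l)]
    rw [List.append_assoc]
    congr 1
    simp only [PySem.Chars.strip, PySem.Chars.lstrip, PySem.Chars.rstrip]
    set m := l.dropWhile PySem.Chars.isspace
    conv_lhs => rw [← List.reverse_reverse m,
      ← List.takeWhile_append_dropWhile (p := PySem.Chars.isspace) (l := m.reverse)]
    rw [List.reverse_append]

theorem clean_modifyHead (u : List Char) (hu : ∀ c ∈ u, PySem.Chars.isspace c = true)
    (ys : List (List Char)) : clean (ys.modifyHead (u ++ ·)) = clean ys := by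
  cases ys with
  | nil => rfl
  | cons a t => simp [clean, cleanTok, strip_ws_append_left u a hu]

theorem clean_mLast (w : List Char) (hw : ∀ c ∈ w, PySem.Chars.isspace c = true)
    (ys : List (List Char)) : clean (mLast (· ++ w) ys) = clean ys := by
  induction ys with
  | nil => rfl
  | cons a t ih =>
    cases t with
    | nil => simp [mLast, clean, cleanTok, strip_append_ws_right a w hw]
    | cons b t' =>
      simp only [mLast, clean, List.flatMap_cons] at ih ⊢
      rw [ih]

theorem clean_splitP_strip (p : Char → Bool)
    (hp : ∀ c, PySem.Chars.isspace c = true → p c = false) (l : List Char) :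
    clean (splitP p (PySem.Chars.strip l)) = clean (splitP p l) := by
  obtain ⟨u, w, hu, hw, hl⟩ := strip_decomp l
  conv_rhs => rw [hl]
  rw [List.append_assoc, splitP_append_free_left p u _ (fun c hc => hp c (hu c hc)),
    splitP_append_free_right p _ w (fun c hc => hp c (hw c hc)),
    clean_modifyHead u hu, clean_mLast w hw]

theorem splitOn_go_eq (c : Char) (fuel : Nat) : ∀ (l cur : List Char) (acc : List (List Char)),
    l.length ≤ fuel →
    PySem.Chars.splitOn.go [c] fuel l cur acc
      = acc.reverse ++ (splitP (· == c) l).modifyHead (cur.reverse ++ ·) := by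
  induction fuel with
  | zero =>
    intro l cur acc h
    have : l = [] := List.length_eq_zero_iff.mp (Nat.le_zero.mp h)
    subst this
    simp [PySem.Chars.splitOn.go, splitP]
  | succ fuel ih =>
    intro l cur acc h
    cases l with
    | nil => simp [PySem.Chars.splitOn.go, splitP]
    | cons c' rest =>
      rw [PySem.Chars.splitOn.go]
      by_cases hc : c = c'
      · subst hc
        rw [if_pos (by simp [List.isPrefixOf])]
        simp only [List.length_cons] at h
        rw [ih _ _ _ (by simpa using Nat.le_of_succ_le_succ h)]
        simp only [splitP, beq_self_eq_true, if_true]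
        cases hr : splitP (· == c) rest with
        | nil => exact absurd hr (splitP_ne_nil _ rest)
        | cons a t => simp [hr]
      · rw [if_neg (by simp [List.isPrefixOf]; intro hh; exact hc hh)]
        simp only [List.length_cons] at h
        rw [ih _ _ _ (Nat.le_of_succ_le_succ h)]
        simp only [splitP]
        rw [if_neg (by simp; intro hh; first | exact hc hh | exact hc hh.symm)]
        cases hr : splitP (· == c) rest with
        | nil => exact absurd hr (splitP_ne_nil _ rest)
        | cons a t => simp

theorem splitOn_eq_splitP (c : Char) (l : List Char) :
    PySem.Chars.splitOn l [c] = splitP (· == c) l := by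
  rw [PySem.Chars.splitOn, splitOn_go_eq c _ l [] [] (by omega)]
  cases h : splitP (· == c) l with
  | nil => exact absurd h (splitP_ne_nil _ l)
  | cons a t => simp

theorem splitOn_nl (l : List Char) : PySem.Chars.splitOn l ['\n'] = splitP pNl l :=
  splitOn_eq_splitP '\n' l

theorem splitOn_dot (l : List Char) : PySem.Chars.splitOn l ['.'] = splitP pDot l :=
  splitOn_eq_splitP '.' l

theorem flatMap_splitP_dot_nl (l : List Char) :
    (splitP pNl l).flatMap (splitP pDot) = splitP pBoth l := by
  induction l with
  | nil => simp [splitP]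
  | cons c rest ih =>
    by_cases hnl : c = '\n'
    · subst hnl
      simp only [splitP, pNl, pBoth]
      norm_num
      simpa [splitP] using ih
    · by_cases hdot : c = '.'
      · subst hdot
        simp only [splitP, pNl, pBoth]
        rw [if_neg (by simp), if_pos (by simp)]
        cases hr : splitP pNl rest with
        | nil => exact absurd hr (splitP_ne_nil _ rest)
        | cons a t =>
          rw [hr] at ih
          simp only [List.modifyHead_cons, List.flatMap_cons] at ih ⊢
          simp only [splitP, pDot, beq_self_eq_true, if_true, List.cons_append]
          rw [← ih]
      · simp only [splitP, pNl, pBoth]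
        rw [if_neg (by simp [hnl]), if_neg (by simp [hdot, hnl])]
        cases hr : splitP pNl rest with
        | nil => exact absurd hr (splitP_ne_nil _ rest)
        | cons a t =>
          rw [hr] at ih
          simp only [List.modifyHead_cons, List.flatMap_cons] at ih ⊢
          simp only [splitP, pDot]
          rw [if_neg (by simp [hdot])]
          cases ha : splitP pDot a with
          | nil => exact absurd ha (splitP_ne_nil _ a)
          | cons b t' =>
            rw [ha] at ih
            simp only [List.modifyHead_cons, List.cons_append] at ih ⊢
            rw [← ih]
            cases hb : splitP pDot a ++ t.flatMap (splitP pDot) with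
            | nil => simp [ha] at hb
            | cons z zs =>
              rw [ha] at hb
              simp at hb
              rw [hb.1, hb.2]
              simp

theorem altGo_eq (cs : List Char) : ∀ buf parts, (∀ c ∈ buf, pBoth c = false) →
    altGo cs buf parts = parts ++ clean (splitP pBoth (buf ++ cs)) := by
  induction cs with
  | nil =>
    intro buf parts hbuf
    simp only [altGo, altFlush, List.append_nil, splitP_free pBoth buf hbuf, clean,
      List.flatMap_cons, List.flatMap_nil, List.append_nil, cleanTok]
    split <;> simp
  | cons c rest ih =>
    intro buf parts hbuf
    simp only [altGo]
    by_cases hc : pBoth c = true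
    · rw [if_pos (by simpa [pBoth] using hc)]
      rw [ih [] _ (by simp)]
      rw [splitP_append_free_left pBoth buf (c :: rest) hbuf]
      simp only [splitP, hc, if_true, List.modifyHead_cons]
      simp only [clean, List.flatMap_cons, List.nil_append]
      simp only [altFlush, cleanTok]
      split <;> rename_i hb <;> simp [hb]
    · rw [if_neg (by simpa [pBoth] using hc)]
      rw [ih (buf ++ [c]) parts (by
        intro d hd
        rcases List.mem_append.mp hd with h | h
        · exact hbuf d h
        · simp at h; subst h; simpa using hc)]
      simp

theorem dot_not_ws : ∀ c, PySem.Chars.isspace c = true → pDot c = false := by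
  intro c h
  by_contra hcon
  have : c = '.' := by simpa [pDot] using hcon
  subst this
  simp [PySem.Chars.isspace] at h

theorem A_line_eq (line : List Char) :
    (if PySem.Chars.strip line = [] then ([] : List String)
     else (splitP pDot (PySem.Chars.strip line)).flatMap (fun sub0 =>
       let sub := PySem.Chars.strip sub0
       if sub = [] then []
       else [String.ofList (if PySem.Chars.startswith sub ['.', ' '] then PySem.List.slice sub (some 2) none else sub)]))
    = clean (splitP pDot line) := by
  rw [← clean_splitP_strip pDot dot_not_ws line]
  by_cases hs : PySem.Chars.strip line = []
  · rw [if_pos hs, hs]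
    simp [splitP, clean, cleanTok, PySem.Chars.strip, PySem.Chars.lstrip, PySem.Chars.rstrip]
  · rw [if_neg hs]
    apply List.flatMap_congr
    intro sub0 hsub0
    simp only [cleanTok]
    by_cases he : PySem.Chars.strip sub0 = []
    · simp [he]
    · rw [if_neg he, if_neg he]
      have hfree := mem_splitP_free pDot _ sub0 hsub0
      have hsw : PySem.Chars.startswith (PySem.Chars.strip sub0) ['.', ' '] = false := by
        cases hd : PySem.Chars.strip sub0 with
        | nil => exact absurd hd he
        | cons d t =>
          have hdm : d ∈ sub0 := mem_strip d sub0 (by rw [hd]; simp)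
          have : pDot d = false := hfree d hdm
          simp only [pDot] at this
          show (('.' == d) && [' '].isPrefixOf t) = false
          have h4 : ('.' == d) = false := by
            simp at this ⊢
            exact fun hh => this hh.symm
          rw [h4]
          simp
      rw [hsw]
      simp

theorem A_eq_clean (text : String) :
    split_text_by_dot_and_newline text = clean (splitP pBoth text.toList) := by
  unfold split_text_by_dot_and_newline
  rw [splitOn_nl]
  have hfun : (fun (parts : List String) (segment0 : List Char) =>
      let segment := PySem.Chars.strip segment0
      if segment = [] then parts
      else
        (PySem.Chars.splitOn segment ['.']).foldl (fun parts sub0 =>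
          let sub := PySem.Chars.strip sub0
          if sub = [] then parts
          else
            let sub := if PySem.Chars.startswith sub ['.', ' '] then PySem.List.slice sub (some 2) none else sub
            parts ++ [String.ofList sub]) parts)
    = (fun parts segment0 => parts ++ clean (splitP pDot segment0)) := by
    funext parts segment0
    rw [← A_line_eq segment0]
    simp only [splitOn_dot]
    by_cases hs : PySem.Chars.strip segment0 = []
    · simp [hs]
    · rw [if_neg hs, if_neg hs]
      have hinner : (fun (parts : List String) (sub0 : List Char) =>
          let sub := PySem.Chars.strip sub0
          if sub = [] then parts
          else
            let sub := if PySem.Chars.startswith sub ['.', ' '] then PySem.List.slice sub (some 2) none else sub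
            parts ++ [String.ofList sub])
        = (fun parts sub0 => parts ++ (fun sub0 =>
            let sub := PySem.Chars.strip sub0
            if sub = [] then ([] : List String)
            else [String.ofList (if PySem.Chars.startswith sub ['.', ' '] then PySem.List.slice sub (some 2) none else sub)]) sub0) := by
        funext parts sub0
        simp only []
        split <;> simp
      rw [hinner, PySem.List.foldl_append_eq_flatMap]
  rw [hfun, PySem.List.foldl_append_eq_flatMap]
  simp only [List.nil_append]
  have : (splitP pNl text.toList).flatMap (fun seg => clean (splitP pDot seg))
      = clean ((splitP pNl text.toList).flatMap (splitP pDot)) := by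
    simp only [clean, List.flatMap_assoc]
  rw [this, flatMap_splitP_dot_nl]

-- ===== VERDICT (by name: the statement is the Claim_ definition above) =====
theorem split_text_by_dot_and_newline_spec : Claim_equal_split_text_by_dot_and_newline := by
  intro text _
  unfold Spec_split_text_by_dot_and_newline split_text_by_dot_and_newline_alt
  rw [A_eq_clean, altGo_eq text.toList [] [] (by simp)]
  simp
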